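-- pv_equiv track=rewrite | github.com/ericc59/aria | aria/repair.py | _find_consistent_cross_demo_map
-- ===== SOURCE A (Python) =====
-- def _find_consistent_cross_demo_map(
--     per_demo_maps: list[dict[int, int] | None],
-- ) -> dict[int, int] | None:
--     """Find a color map consistent across all demos that have diffs.
--
--     Returns None if demos disagree on any mapping.
--     """
--     merged: dict[int, int] = {}
--     for cmap in per_demo_maps:
--         if cmap is None:
--             continue
--         if not cmap:
--             continue  # demo was already correct
--         for fc, tc in cmap.items():
--             if fc in merged:
--                 if merged[fc] != tc:
--                     return None  # inconsistent
--             else: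
--                 merged[fc] = tc
--     return merged if merged else None
-- ===== SOURCE B (Python) =====
-- def _find_consistent_cross_demo_map(per_demo_maps):
--     """Two-pass variant: accumulate candidate targets per from-color, then validate."""
--     groups = {}  # fc -> set of target colors seen across demos
--     for cmap in per_demo_maps:
--         if cmap is None:
--             continue
--         for fc, tc in cmap.items():
--             groups.setdefault(fc, set()).add(tc)
--     if any(len(ts) > 1 for ts in groups.values()):
--         return None  # some demo disagrees
--     result = {fc: next(iter(ts)) for fc, ts in groups.items()}
--     return result or None
-- ===== Notes on version B (the rewrite author's own statement) =====
-- stated objective: alternative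
-- what changed: Replaces the fused check-and-commit loop with early return by two separate passes: first accumulate a dict mapping each from-color to the set of target colors seen, then validate in a distinct pass (None iff some set has more than one element or nothing was merged) and extract the unique targets.
import Mathlib
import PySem

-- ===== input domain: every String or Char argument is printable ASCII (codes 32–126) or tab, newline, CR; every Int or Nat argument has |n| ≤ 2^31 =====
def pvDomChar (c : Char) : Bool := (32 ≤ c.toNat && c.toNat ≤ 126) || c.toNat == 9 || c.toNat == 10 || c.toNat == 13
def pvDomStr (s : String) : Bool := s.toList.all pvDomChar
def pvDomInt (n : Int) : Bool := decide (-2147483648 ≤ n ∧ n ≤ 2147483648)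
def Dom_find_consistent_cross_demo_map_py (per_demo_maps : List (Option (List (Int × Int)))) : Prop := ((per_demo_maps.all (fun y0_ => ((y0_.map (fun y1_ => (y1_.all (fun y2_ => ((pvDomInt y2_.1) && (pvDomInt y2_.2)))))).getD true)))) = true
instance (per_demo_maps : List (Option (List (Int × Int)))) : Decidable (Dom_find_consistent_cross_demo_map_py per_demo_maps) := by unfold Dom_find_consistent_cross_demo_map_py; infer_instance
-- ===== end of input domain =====

-- B replaces A's fused check-and-commit loop (early return on conflict) by two separate passes:
-- accumulate a dict of candidate-target sets, then validate it and extract the unique targets (alternative decomposition, same cost).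


-- ===== PORT A =====
-- inner 'for fc, tc in cmap.items()' loop: check against merged, early return None on conflict
def pvAcmap (merged : PySem.Dict Int Int) : List (Int × Int) → Option (PySem.Dict Int Int)
  | [] => some merged
  | (fc, tc) :: rest =>
    match merged.get? fc with          -- 'if fc in merged' guards the lookup 'merged[fc]'
    | some v => if v ≠ tc then none else pvAcmap merged rest
    | none => pvAcmap (merged.insert fc tc) rest

-- outer 'for cmap in per_demo_maps' loop
def pvAloop (merged : PySem.Dict Int Int) : List (Option (List (Int × Int))) → Option (PySem.Dict Int Int)
  | [] => some merged
  | cm :: rest =>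
    match cm with
    | none => pvAloop merged rest              -- 'if cmap is None: continue'
    | some cmap =>
      if cmap.isEmpty then pvAloop merged rest -- 'if not cmap: continue'
      else
        match pvAcmap merged cmap with
        | none => none
        | some m => pvAloop m rest

def find_consistent_cross_demo_map_py (per_demo_maps : List (Option (List (Int × Int)))) : Option (List (Int × Int)) :=
  match pvAloop PySem.Dict.empty per_demo_maps with
  | none => none
  | some merged => if merged.items.isEmpty then none else some merged.items  -- 'return merged if merged else None'

-- ===== PORT B =====
-- 'groups.setdefault(fc, set()).add(tc)'
def pvBstep (g : PySem.Dict Int (PySem.Set Int)) (p : Int × Int) : PySem.Dict Int (PySem.Set Int) :=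
  g.modify p.1 PySem.Set.empty (fun s => PySem.Set.add s p.2)

-- pass 1: accumulate the candidate-target sets
def pvBgroups (per_demo_maps : List (Option (List (Int × Int)))) : PySem.Dict Int (PySem.Set Int) :=
  per_demo_maps.foldl
    (fun g cm => match cm with
      | none => g                              -- 'if cmap is None: continue'
      | some cmap => cmap.foldl pvBstep g)
    PySem.Dict.empty

def find_consistent_cross_demo_map_py_alt (per_demo_maps : List (Option (List (Int × Int)))) : Option (List (Int × Int)) :=
  let groups := pvBgroups per_demo_maps
  if groups.values.any (fun ts => 1 < PySem.Set.len ts) then none  -- pass 2: validate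
  else
    -- 'next(iter(ts))': ts is a singleton here, so taking the head is order-independent
    let result := groups.items.map (fun p => (p.1, p.2.headD 0))
    if result.isEmpty then none else some result                   -- 'return result or None'

-- ===== PRECONDITION & SPEC =====
def Spec_find_consistent_cross_demo_map_py (per_demo_maps : List (Option (List (Int × Int)))) (out : Option (List (Int × Int))) : Prop := out = find_consistent_cross_demo_map_py_alt per_demo_maps
instance (per_demo_maps : List (Option (List (Int × Int)))) (out : Option (List (Int × Int))) : Decidable (Spec_find_consistent_cross_demo_map_py per_demo_maps out) := by unfold Spec_find_consistent_cross_demo_map_py; infer_instance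

-- ===== CLAIM (what is proved, stated in full; the proofs are below) =====
def Claim_equal_find_consistent_cross_demo_map_py : Prop := ∀ (per_demo_maps : List (Option (List (Int × Int)))), Dom_find_consistent_cross_demo_map_py per_demo_maps → Spec_find_consistent_cross_demo_map_py per_demo_maps (find_consistent_cross_demo_map_py per_demo_maps)

-- ===== LEMMAS AND PROOFS =====

-- the relation between A's merged dict and B's groups dict on the conflict-free prefix
def pvG (p : Int × Int) : Int × PySem.Set Int := (p.1, [p.2])

def pvRel (m : PySem.Dict Int Int) (g : PySem.Dict Int (PySem.Set Int)) : Prop :=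
  g.items = m.items.map pvG

-- B's groups dict records a conflict
def pvBad (g : PySem.Dict Int (PySem.Set Int)) : Prop :=
  ∃ v ∈ g.values, 1 < v.length

lemma pv_rel_get? {m : PySem.Dict Int Int} {g : PySem.Dict Int (PySem.Set Int)}
    (h : pvRel m g) (k : Int) :
    g.get? k = (m.get? k).map (fun v => ([v] : PySem.Set Int)) := by
  obtain ⟨lm⟩ := m
  obtain ⟨lg⟩ := g
  simp only [pvRel] at h
  subst h
  induction lm with
  | nil => rfl
  | cons p rest ih =>
      obtain ⟨a, b⟩ := p
      simp only [List.map_cons, pvG, PySem.Dict.get?_mk_cons]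
      split <;> simp [ih]

lemma pv_step_absent {g : PySem.Dict Int (PySem.Set Int)} {fc tc : Int}
    (h : g.get? fc = none) :
    (pvBstep g (fc, tc)).items = g.items ++ [(fc, [tc])] := by
  have hc : g.contains fc = false := by
    rw [PySem.Dict.contains_eq_isSome_get?, h]; rfl
  have hget : g.getD fc PySem.Set.empty = PySem.Set.empty := by
    rw [PySem.Dict.getD_eq_get?_getD, h]; rfl
  simp only [pvBstep, PySem.Dict.modify, hget]
  have : PySem.Set.add (PySem.Set.empty : PySem.Set Int) tc = [tc] := rfl
  rw [this, PySem.Dict.items_insert_of_not_contains _ _ hc]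

lemma pv_entry_unique {l : List (Int × PySem.Set Int)} (hn : (l.map Prod.fst).Nodup)
    {p q : Int × PySem.Set Int} (hp : p ∈ l) (hq : q ∈ l) (hk : p.1 = q.1) : p = q := by
  have := List.inj_on_of_nodup_map hn hp hq hk
  exact this

lemma pv_step_present_eq {g : PySem.Dict Int (PySem.Set Int)} {fc tc : Int}
    (hn : g.keys.Nodup) (h : g.get? fc = some [tc]) :
    pvBstep g (fc, tc) = g := by
  have hc : g.contains fc = true := by
    rw [PySem.Dict.contains_eq_isSome_get?, h]; rfl
  have hget : g.getD fc PySem.Set.empty = [tc] := by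
    rw [PySem.Dict.getD_eq_get?_getD, h]; rfl
  have hadd : PySem.Set.add ([tc] : PySem.Set Int) tc = [tc] := by
    simp [PySem.Set.add]
  apply PySem.Dict.ext
  simp only [pvBstep, PySem.Dict.modify, hget, hadd]
  rw [PySem.Dict.items_insert_of_contains _ _ hc]
  have hmem : (fc, ([tc] : PySem.Set Int)) ∈ g.items :=
    ((PySem.Dict.get?_eq_some_iff_mem_items g fc [tc] hn).mp h)
  have : ∀ q ∈ g.items, (if (q.1 == fc) = true then (fc, ([tc] : PySem.Set Int)) else q) = q := by
    intro q hq
    split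
    · next heq =>
        have hk : q.1 = fc := by simpa using heq
        have := pv_entry_unique hn hmem hq (by simp [hk])
        simp [← this]
    · rfl
  calc List.map (fun q => if (q.1 == fc) = true then (fc, ([tc] : PySem.Set Int)) else q) g.items
      = List.map id g.items := List.map_congr_left this
    _ = g.items := List.map_id g.items

lemma pv_step_nodup {g : PySem.Dict Int (PySem.Set Int)} (hn : g.keys.Nodup) (p : Int × Int) :
    (pvBstep g p).keys.Nodup := by
  simpa [pvBstep, PySem.Dict.modify] using PySem.Dict.nodup_keys_insert _ _ _ hn

lemma pv_len_add (s : PySem.Set Int) (x : Int) : s.length ≤ (PySem.Set.add s x).length := by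
  simp only [PySem.Set.add]
  split <;> simp

lemma pv_bad_step {g : PySem.Dict Int (PySem.Set Int)} (hn : g.keys.Nodup) (hb : pvBad g)
    (p : Int × Int) : pvBad (pvBstep g p) := by
  obtain ⟨v0, hv0, hlen⟩ := hb
  simp only [PySem.Dict.values, List.mem_map] at hv0
  obtain ⟨q, hqmem, hq2⟩ := hv0
  unfold pvBad
  by_cases hc : g.contains p.1 = true
  · have hitems : (pvBstep g p).items
        = g.items.map (fun r => if (r.1 == p.1) = true then (p.1, (g.getD p.1 PySem.Set.empty).add p.2) else r) := by
      simp only [pvBstep, PySem.Dict.modify]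
      exact PySem.Dict.items_insert_of_contains _ _ hc
    by_cases hk : q.1 = p.1
    · have hq : q = (p.1, v0) := Prod.ext hk hq2
      have hget : g.getD p.1 PySem.Set.empty = v0 := by
        rw [PySem.Dict.getD_eq_get?_getD,
          (PySem.Dict.get?_eq_some_iff_mem_items g p.1 v0 hn).mpr (hq ▸ hqmem)]
        rfl
      have hmem2 : (p.1, v0.add p.2) ∈ (pvBstep g p).items := by
        rw [hitems]
        refine List.mem_map.mpr ⟨q, hqmem, ?_⟩
        have hget' : g.getD p.1 ([] : PySem.Set Int) = v0 := hget
        simp [hk, hget']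
      exact ⟨v0.add p.2, List.mem_map.mpr ⟨_, hmem2, rfl⟩,
        lt_of_lt_of_le hlen (pv_len_add v0 p.2)⟩
    · have hmem2 : q ∈ (pvBstep g p).items := by
        rw [hitems]
        exact List.mem_map.mpr ⟨q, hqmem, by simp [hk]⟩
      exact ⟨v0, List.mem_map.mpr ⟨q, hmem2, hq2⟩, hlen⟩
  · have hitems : (pvBstep g p).items = g.items ++ [(p.1, (g.getD p.1 PySem.Set.empty).add p.2)] := by
      simp only [pvBstep, PySem.Dict.modify]
      exact PySem.Dict.items_insert_of_not_contains _ _ (by simpa using hc)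
    have hmem2 : q ∈ (pvBstep g p).items := by
      rw [hitems]; exact List.mem_append_left _ hqmem
    exact ⟨v0, List.mem_map.mpr ⟨q, hmem2, hq2⟩, hlen⟩

lemma pv_bad_foldl (ps : List (Int × Int)) :
    ∀ (g : PySem.Dict Int (PySem.Set Int)), g.keys.Nodup → pvBad g →
    pvBad (ps.foldl pvBstep g) := by
  induction ps with
  | nil => intro g _ hb; exact hb
  | cons p rest ih =>
      intro g hn hb
      exact ih _ (pv_step_nodup hn p) (pv_bad_step hn hb p)

-- main invariant: A's inner loop vs B's accumulation, over the same pair stream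
-- main invariant: A's inner loop vs B's accumulation, over the same pair stream
lemma pv_main (ps : List (Int × Int)) :
    ∀ (m : PySem.Dict Int Int) (g : PySem.Dict Int (PySem.Set Int)),
    pvRel m g → g.keys.Nodup →
    (match pvAcmap m ps with
     | some m' => pvRel m' (ps.foldl pvBstep g)
     | none => pvBad (ps.foldl pvBstep g)) := by
  induction ps with
  | nil => intro m g hrel _; simpa [pvAcmap] using hrel
  | cons p rest ih =>
      intro m g hrel hn
      obtain ⟨fc, tc⟩ := p
      have hg := pv_rel_get? hrel fc
      rw [List.foldl_cons]
      cases hm : m.get? fc with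
      | some v =>
          rw [hm] at hg
          have hg' : g.get? fc = some [v] := by simpa using hg
          by_cases hv : v = tc
          · subst hv
            have hstep : pvAcmap m ((fc, v) :: rest) = pvAcmap m rest := by
              simp [pvAcmap, hm]
            rw [hstep, show pvBstep g (fc, v) = g from pv_step_present_eq hn hg']
            exact ih m g hrel hn
          · have hstep : pvAcmap m ((fc, tc) :: rest) = none := by
              simp [pvAcmap, hm, hv]
            rw [hstep]
            have hc : g.contains fc = true := by
              rw [PySem.Dict.contains_eq_isSome_get?, hg']; rfl
            have hget : g.getD fc PySem.Set.empty = [v] := by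
              rw [PySem.Dict.getD_eq_get?_getD, hg']; rfl
            have hitems : (pvBstep g (fc, tc)).items
                = g.items.map (fun r => if (r.1 == fc) = true then (fc, PySem.Set.add [v] tc) else r) := by
              simp only [pvBstep, PySem.Dict.modify, hget]
              exact PySem.Dict.items_insert_of_contains _ _ hc
            have hmem : (fc, ([v] : PySem.Set Int)) ∈ g.items :=
              (PySem.Dict.get?_eq_some_iff_mem_items g fc [v] hn).mp hg'
            have haddv : PySem.Set.add ([v] : PySem.Set Int) tc = [v, tc] := by
              simp [PySem.Set.add, Ne.symm hv]
            have hbad : pvBad (pvBstep g (fc, tc)) := by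
              unfold pvBad
              have hmem2 : (fc, ([v, tc] : PySem.Set Int)) ∈ (pvBstep g (fc, tc)).items := by
                rw [hitems]
                refine List.mem_map.mpr ⟨(fc, [v]), hmem, ?_⟩
                simp [haddv]
              exact ⟨[v, tc], List.mem_map.mpr ⟨_, hmem2, rfl⟩, by simp⟩
            exact pv_bad_foldl rest _ (pv_step_nodup hn _) hbad
      | none =>
          rw [hm] at hg
          have hg' : g.get? fc = none := by simpa using hg
          have hstep : pvAcmap m ((fc, tc) :: rest) = pvAcmap (m.insert fc tc) rest := by
            simp [pvAcmap, hm]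
          rw [hstep]
          have habs : (pvBstep g (fc, tc)).items = g.items ++ [(fc, [tc])] :=
            pv_step_absent hg'
          have hrel' : pvRel (m.insert fc tc) (pvBstep g (fc, tc)) := by
            have hcm : m.contains fc = false := by
              rw [PySem.Dict.contains_eq_isSome_get?, hm]; rfl
            unfold pvRel at hrel ⊢
            rw [habs, PySem.Dict.items_insert_of_not_contains _ _ hcm, hrel]
            simp [pvG]
          exact ih _ _ hrel' (pv_step_nodup hn _)

def pvFlat (pms : List (Option (List (Int × Int)))) : List (Int × Int) :=
  (pms.filterMap id).flatten

lemma pvAcmap_append (xs ys : List (Int × Int)) :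
    ∀ m, pvAcmap m (xs ++ ys) = (pvAcmap m xs).bind (fun m' => pvAcmap m' ys) := by
  induction xs with
  | nil => intro m; rfl
  | cons p rest ih =>
      intro m
      obtain ⟨fc, tc⟩ := p
      simp only [List.cons_append, pvAcmap]
      match m.get? fc with
      | some v =>
          by_cases hv : v ≠ tc
          · simp [hv]
          · simp only [if_neg hv]; exact ih m
      | none => exact ih _

lemma pvAloop_flat (pms : List (Option (List (Int × Int)))) :
    ∀ m, pvAloop m pms = pvAcmap m (pvFlat pms) := by
  induction pms with
  | nil => intro m; rfl
  | cons cm rest ih =>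
      intro m
      match cm with
      | none =>
          have hf : pvFlat (none :: rest) = pvFlat rest := by simp [pvFlat]
          rw [hf]; exact ih m
      | some cmap =>
          have hf : pvFlat (some cmap :: rest) = cmap ++ pvFlat rest := by simp [pvFlat]
          by_cases he : cmap.isEmpty
          · have hce : cmap = [] := by simpa using he
            subst hce
            simp only [pvAloop, hf, List.nil_append]
            exact ih m
          · simp only [pvAloop, if_neg he, hf, pvAcmap_append]
            cases hA : pvAcmap m cmap with
            | none => rfl
            | some m' => simpa using ih m'

lemma pvBgroups_flat (pms : List (Option (List (Int × Int)))) :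
    ∀ g, pms.foldl
      (fun g cm => match cm with
        | none => g
        | some cmap => cmap.foldl pvBstep g) g
      = (pvFlat pms).foldl pvBstep g := by
  induction pms with
  | nil => intro g; rfl
  | cons cm rest ih =>
      intro g
      match cm with
      | none => simpa [pvFlat] using ih g
      | some cmap =>
          simp only [List.foldl_cons]
          rw [ih, show pvFlat (some cmap :: rest) = cmap ++ pvFlat rest by simp [pvFlat],
            List.foldl_append]

-- ===== VERDICT (by name: the statement is the Claim_ definition above) =====
theorem find_consistent_cross_demo_map_py_spec : Claim_equal_find_consistent_cross_demo_map_py := by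
  unfold Claim_equal_find_consistent_cross_demo_map_py
  intro pms _
  unfold Spec_find_consistent_cross_demo_map_py
  unfold find_consistent_cross_demo_map_py find_consistent_cross_demo_map_py_alt
  have hB : pvBgroups pms = (pvFlat pms).foldl pvBstep PySem.Dict.empty := by
    unfold pvBgroups; exact pvBgroups_flat pms _
  rw [pvAloop_flat pms PySem.Dict.empty, hB]
  have hmain := pv_main (pvFlat pms) PySem.Dict.empty PySem.Dict.empty rfl
    PySem.Dict.nodup_keys_empty
  set G := (pvFlat pms).foldl pvBstep (PySem.Dict.empty : PySem.Dict Int (PySem.Set Int)) with hGdef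
  match hA : pvAcmap PySem.Dict.empty (pvFlat pms) with
  | none =>
      rw [hA] at hmain
      have hbadG : pvBad G := hmain
      obtain ⟨v, hv, hlen⟩ := hbadG
      have hany : (G.values.any fun ts => decide (1 < PySem.Set.len ts)) = true := by
        refine List.any_eq_true.mpr ⟨v, hv, ?_⟩
        simp only [PySem.Set.len, decide_eq_true_eq]
        exact_mod_cast hlen
      rw [if_pos hany]
  | some m' =>
      rw [hA] at hmain
      have hrelm : G.items = m'.items.map pvG := hmain
      have hvals : (G.values.any fun ts => decide (1 < PySem.Set.len ts)) = false := by
        refine List.any_eq_false.mpr ?_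
        intro ts hts
        simp only [PySem.Dict.values, hrelm, List.map_map, List.mem_map] at hts
        obtain ⟨q, _, hq⟩ := hts
        simp only [Function.comp, pvG] at hq
        simp [PySem.Set.len, ← hq]
      have hres : G.items.map (fun p => (p.1, p.2.headD 0)) = m'.items := by
        rw [hrelm, List.map_map]
        have hfun : ((fun p : Int × PySem.Set Int => (p.1, p.2.headD 0)) ∘ pvG)
            = (id : Int × Int → Int × Int) := by
          funext q; simp [pvG, Function.comp]
        rw [hfun, List.map_id]
      rw [if_neg (by rw [hvals]; exact Bool.false_ne_true)]
      show (if m'.items.isEmpty = true then none else some m'.items)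
          = (if (G.items.map (fun p => (p.1, p.2.headD 0))).isEmpty = true then none
             else some (G.items.map (fun p => (p.1, p.2.headD 0))))
      rw [hres]
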